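-- pv_equiv track=rewrite | github.com/SirArchy/CoMa-1 | .ipynb_checkpoints/CoMa_Proggen_HA1-checkpoint.py | roots
-- ===== SOURCE A (Python) =====
-- def roots(a, b, c, d, e, f):
--     # Berechnung der Koeffizienten für h+f*g
--     c5 = 0
--     c4 = a*d
--     c3 = a*e + b*d
--     c2 = a*f + b*e + c*d
--     c1 = b*f + c*e
--     c0 = c*f
--     # Variable um Vorzeichen Wechsel zu speichern
--     VorzeichenWechsel = 0
--     # Liste mit den Eingabewerten des Nutzers
--     DescartesList = [c5, c4, c3, c2, c1, c0]
--
--     for x in range(0, len(DescartesList)-1):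
--         if (DescartesList[x] < 0 and DescartesList[x+1] >= 0):
--             VorzeichenWechsel = VorzeichenWechsel + 1
--         elif (DescartesList[x] >= 0 and DescartesList[x+1] < 0):
--             VorzeichenWechsel = VorzeichenWechsel + 1
--
--     # Prüfen ob Vorzeichenwechsel gerade Anzahl oder ungerade Anzahl
--     if (VorzeichenWechsel % 2 == 0):
--         return("Das Polynom hat eine gerade Anzahl von positiven reellen Wurzeln.")
--     else:
--         return ("Das Polynom hat eine ungerade Anzahl von positiven reellen Wurzeln.")
-- ===== SOURCE B (Python) =====
-- def roots(a, b, c, d, e, f):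
--     # Parity of sign changes in [0, a*d, ..., c*f] equals whether the last
--     # coefficient c*f is negative (the sequence starts in the ">= 0" class).
--     if c * f >= 0:
--         return "Das Polynom hat eine gerade Anzahl von positiven reellen Wurzeln."
--     else:
--         return "Das Polynom hat eine ungerade Anzahl von positiven reellen Wurzeln."
-- ===== Notes on version B (the rewrite author's own statement) =====
-- stated objective: simpler
-- what changed: Replaces the coefficient list and the sign-change counting loop by the closed form: the parity of sign changes starting from c5=0 (the >=0 class) is odd exactly when the last coefficient c*f is negative, so B just tests c*f >= 0.
import Mathlib
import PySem

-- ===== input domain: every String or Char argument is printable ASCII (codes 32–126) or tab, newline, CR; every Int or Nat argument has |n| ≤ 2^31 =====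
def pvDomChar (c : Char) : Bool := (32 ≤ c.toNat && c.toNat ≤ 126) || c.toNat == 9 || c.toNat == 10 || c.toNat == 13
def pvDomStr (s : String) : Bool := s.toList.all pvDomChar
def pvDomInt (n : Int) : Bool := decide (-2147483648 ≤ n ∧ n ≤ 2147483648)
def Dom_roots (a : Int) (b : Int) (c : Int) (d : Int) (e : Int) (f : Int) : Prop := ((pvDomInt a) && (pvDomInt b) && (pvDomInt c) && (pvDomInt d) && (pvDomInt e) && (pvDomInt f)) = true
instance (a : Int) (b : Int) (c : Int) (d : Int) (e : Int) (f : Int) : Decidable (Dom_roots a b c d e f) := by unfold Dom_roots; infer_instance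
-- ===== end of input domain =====

-- B replaces A's coefficient list and sign-change counting loop by a single sign test of c*f (closed form for the parity); objective: simpler.
-- ===== PORT A =====
def roots (a : Int) (b : Int) (c : Int) (d : Int) (e : Int) (f : Int) : String :=
  let c5 : Int := 0
  let c4 := a*d
  let c3 := a*e + b*d
  let c2 := a*f + b*e + c*d
  let c1 := b*f + c*e
  let c0 := c*f
  let descartesList : List Int := [c5, c4, c3, c2, c1, c0]
  let vorzeichenWechsel : Int :=
    (PySem.List.pyRange 0 ((descartesList.length : Int) - 1) 1).foldl (fun acc x =>
      if PySem.List.pyGetD descartesList x 0 < 0 ∧ 0 ≤ PySem.List.pyGetD descartesList (x+1) 0 then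
        acc + 1
      else if 0 ≤ PySem.List.pyGetD descartesList x 0 ∧ PySem.List.pyGetD descartesList (x+1) 0 < 0 then
        acc + 1
      else acc) 0
  if PySem.Int.mod vorzeichenWechsel 2 = 0 then
    "Das Polynom hat eine gerade Anzahl von positiven reellen Wurzeln."
  else
    "Das Polynom hat eine ungerade Anzahl von positiven reellen Wurzeln."

-- ===== PORT B =====
def roots_alt (a : Int) (b : Int) (c : Int) (d : Int) (e : Int) (f : Int) : String :=
  if 0 ≤ c * f then
    "Das Polynom hat eine gerade Anzahl von positiven reellen Wurzeln."
  else
    "Das Polynom hat eine ungerade Anzahl von positiven reellen Wurzeln."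

-- ===== PRECONDITION & SPEC =====
def Spec_roots (a : Int) (b : Int) (c : Int) (d : Int) (e : Int) (f : Int) (out : String) : Prop := out = roots_alt a b c d e f
instance (a : Int) (b : Int) (c : Int) (d : Int) (e : Int) (f : Int) (out : String) : Decidable (Spec_roots a b c d e f out) := by unfold Spec_roots; infer_instance

-- ===== CLAIM (what is proved, stated in full; the proofs are below) =====
def Claim_equal_roots : Prop := ∀ (a : Int) (b : Int) (c : Int) (d : Int) (e : Int) (f : Int), Dom_roots a b c d e f → Spec_roots a b c d e f (roots a b c d e f)

-- ===== LEMMAS AND PROOFS =====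
theorem pyRange05 : PySem.List.pyRange 0 5 1 = [0, 1, 2, 3, 4] := by decide

theorem pg1 (y0 y1 y2 y3 y4 y5 : Int) : PySem.List.pyGetD [y0,y1,y2,y3,y4,y5] 1 0 = y1 := rfl
theorem pg2 (y0 y1 y2 y3 y4 y5 : Int) : PySem.List.pyGetD [y0,y1,y2,y3,y4,y5] 2 0 = y2 := rfl
theorem pg3 (y0 y1 y2 y3 y4 y5 : Int) : PySem.List.pyGetD [y0,y1,y2,y3,y4,y5] 3 0 = y3 := rfl
theorem pg4 (y0 y1 y2 y3 y4 y5 : Int) : PySem.List.pyGetD [y0,y1,y2,y3,y4,y5] 4 0 = y4 := rfl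
theorem pg5 (y0 y1 y2 y3 y4 y5 : Int) : PySem.List.pyGetD [y0,y1,y2,y3,y4,y5] 5 0 = y5 := rfl
theorem le_iff_not_lt0 (x : Int) : (0 ≤ x) ↔ ¬ (x < 0) := not_lt.symm

-- Case split on the coefficient signs evaluates A's counting loop and B's test in each case.
set_option maxHeartbeats 1000000 in
theorem roots_eq_alt (a b c d e f : Int) : roots a b c d e f = roots_alt a b c d e f := by
  unfold roots roots_alt
  norm_num
  rw [pyRange05]
  by_cases h1 : a*d < 0 <;> by_cases h2 : a*e + b*d < 0 <;>
    by_cases h3 : a*f + b*e + c*d < 0 <;> by_cases h4 : b*f + c*e < 0 <;>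
    by_cases h5 : c*f < 0 <;>
    norm_num [List.foldl, pg1, pg2, pg3, pg4, pg5, le_iff_not_lt0, h1, h2, h3, h4, h5]

-- ===== VERDICT (by name: the statement is the Claim_ definition above) =====
theorem roots_spec : Claim_equal_roots := by
  intro a b c d e f _
  exact roots_eq_alt a b c d e f
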